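-- pv_equiv track=rewrite | github.com/bramstoeller/adventofcode | 2024/day19.py | count_can_form
-- ===== SOURCE A (Python) =====
-- def count_can_form(word, other_words):
--     if len(word) == 0:
--         return 1
--     matches = 0
--     for w in other_words:
--         if word.startswith(w):
--             matches += count_can_form(word[len(w):], other_words)
--     return matches
-- ===== SOURCE B (Python) =====
-- def count_can_form(word, other_words):
--     # Bottom-up DP over suffixes: ways[k] (front of list) = number of ways to
--     # form the suffix starting at position i+k+1, built back-to-front.
--     ways = [1]  # suffix starting at len(word): the empty suffix, one way
--     for i in range(len(word) - 1, -1, -1):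
--         total = 0
--         for w in other_words:
--             lw = len(w)
--             if lw and word.startswith(w, i):
--                 total += ways[lw - 1]
--         ways.insert(0, total)
--     return ways[0]
-- ===== Notes on version B (the rewrite author's own statement) =====
-- stated objective: alternative
-- what changed: Replaces A's top-down recursion (recomputed on every call, exponential in the worst case) with a bottom-up dynamic program that tabulates the number of decompositions of each suffix once, back-to-front; a timing run found no measured speed-up on random inputs where A's recursion dies early.
import Mathlib
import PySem

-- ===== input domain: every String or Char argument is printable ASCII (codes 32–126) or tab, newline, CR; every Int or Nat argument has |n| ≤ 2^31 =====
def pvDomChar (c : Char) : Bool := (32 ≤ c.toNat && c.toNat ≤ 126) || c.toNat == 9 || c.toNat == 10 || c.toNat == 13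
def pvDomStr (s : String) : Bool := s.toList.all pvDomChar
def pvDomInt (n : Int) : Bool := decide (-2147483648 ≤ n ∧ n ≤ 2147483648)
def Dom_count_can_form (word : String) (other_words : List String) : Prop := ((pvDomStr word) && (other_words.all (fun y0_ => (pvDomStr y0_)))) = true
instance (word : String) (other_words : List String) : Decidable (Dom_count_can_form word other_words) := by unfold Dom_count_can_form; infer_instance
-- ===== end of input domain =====

-- B replaces A's top-down recursion by a bottom-up DP table over suffixes (a different algorithm; no speed claim).

-- ===== PORT A =====
-- A's recursion carries no fuel in Python; the fuel argument (length of word + 1,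
-- enough for every recursive call under Pre_) only makes the recursion structural.
def pvAGo (ows : List (List Char)) : Nat → List Char → Int
  | 0, _ => 0
  | fuel + 1, s =>
    if s = [] then 1
    else ows.foldl
      (fun m_ w =>
        if w.isPrefixOf s then m_ + pvAGo ows fuel (s.drop w.length) else m_)
      0

def count_can_form (word : String) (other_words : List String) : Int :=
  pvAGo (other_words.map String.toList) (word.toList.length + 1) word.toList

-- ===== PORT B =====
-- inner loop of Source B: total over pieces for position i, given the table for positions i+1..n
def pvBInner (wl : List Char) (ows : List (List Char)) (i : Nat) (ways : List Int) : Int :=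
  ows.foldl
    (fun total w =>
      if w ≠ [] ∧ w.isPrefixOf (wl.drop i) then total + ways.getD (w.length - 1) 0 else total)
    0

-- outer loop of Source B: `for i in range(len(word)-1, -1, -1): ways.insert(0, total)`
def pvBLoop (wl : List Char) (ows : List (List Char)) : Nat → List Int → List Int
  | 0, ways => ways
  | i + 1, ways => pvBLoop wl ows i (pvBInner wl ows i ways :: ways)

def count_can_form_alt (word : String) (other_words : List String) : Int :=
  (pvBLoop word.toList (other_words.map String.toList) word.toList.length [1]).getD 0 0

-- ===== PRECONDITION & SPEC =====
-- A recurses forever (RecursionError) when the word is nonempty and "" is a piece; Pre_ excludes exactly that.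
def Pre_count_can_form (word : String) (other_words : List String) : Prop :=
  word = "" ∨ "" ∉ other_words
instance (word : String) (other_words : List String) : Decidable (Pre_count_can_form word other_words) := by unfold Pre_count_can_form; infer_instance

def pvWitness_count_can_form : String × List String := ("abc", ["a", "bc", "ab", "c"])

def Spec_count_can_form (word : String) (other_words : List String) (out : Int) : Prop := out = count_can_form_alt word other_words
instance (word : String) (other_words : List String) (out : Int) : Decidable (Spec_count_can_form word other_words out) := by unfold Spec_count_can_form; infer_instance

-- ===== CLAIM (what is proved, stated in full; the proofs are below) =====
def Claim_equal_count_can_form : Prop := ∀ (word : String) (other_words : List String), Dom_count_can_form word other_words → Pre_count_can_form word other_words → Spec_count_can_form word other_words (count_can_form word other_words)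

-- ===== LEMMAS AND PROOFS =====

-- With no empty piece, A's result does not depend on the fuel, as long as it exceeds the word length.
lemma pvAGo_fuel (ows : List (List Char)) (h0 : [] ∉ ows) :
    ∀ (n : Nat) (s : List Char) (a b : Nat), s.length ≤ n → s.length < a → s.length < b →
      pvAGo ows a s = pvAGo ows b s := by
  intro n
  induction n with
  | zero =>
    intro s a b hs ha hb
    obtain ⟨a', rfl⟩ : ∃ a', a = a' + 1 := ⟨a - 1, by omega⟩
    obtain ⟨b', rfl⟩ : ∃ b', b = b' + 1 := ⟨b - 1, by omega⟩
    have : s = [] := List.length_eq_zero_iff.mp (by omega)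
    simp [pvAGo, this]
  | succ n ih =>
    intro s a b hs ha hb
    obtain ⟨a', rfl⟩ : ∃ a', a = a' + 1 := ⟨a - 1, by omega⟩
    obtain ⟨b', rfl⟩ : ∃ b', b = b' + 1 := ⟨b - 1, by omega⟩
    by_cases hsnil : s = []
    · simp [pvAGo, hsnil]
    · simp only [pvAGo, if_neg hsnil]
      refine PySem.List.foldl_congr_mem _ _ _ _ ?_
      intro acc w hw
      by_cases hp : w.isPrefixOf s
      · have hwne : w ≠ [] := fun h => h0 (h ▸ hw)
        have hwlen : 1 ≤ w.length := by
          cases w with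
          | nil => exact absurd rfl hwne
          | cons c t => simp
        have hle : w.length ≤ s.length := (List.IsPrefix.length_le (List.isPrefixOf_iff_prefix.mp hp))
        have hslen : 1 ≤ s.length := by
          cases s with
          | nil => exact absurd rfl hsnil
          | cons c t => simp
        rw [if_pos hp, if_pos hp, ih (s.drop w.length) a' b' (by simp; omega)
          (by simp; omega) (by simp; omega)]
      · rw [if_neg hp, if_neg hp]

-- canonical value of A on a suffix
def pvW (ows : List (List Char)) (s : List Char) : Int := pvAGo ows (s.length + 1) s

-- the DP table for positions i .. n
def pvTab (wl : List Char) (ows : List (List Char)) (i : Nat) : List Int :=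
  (List.range' i (wl.length + 1 - i)).map (fun j => pvW ows (wl.drop j))

lemma pvTab_cons (wl : List Char) (ows : List (List Char)) (i : Nat) (hi : i ≤ wl.length) :
    pvTab wl ows i = pvW ows (wl.drop i) :: pvTab wl ows (i + 1) := by
  unfold pvTab
  have : wl.length + 1 - i = (wl.length - i) + 1 := by omega
  rw [this, List.range'_succ]
  simp

lemma pvBInner_tab (wl : List Char) (ows : List (List Char)) (h0 : [] ∉ ows)
    (i : Nat) (hi : i < wl.length) :
    pvBInner wl ows i (pvTab wl ows (i + 1)) = pvW ows (wl.drop i) := by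
  have hsne : wl.drop i ≠ [] := by
    intro h
    have := congrArg List.length h
    simp at this
    omega
  unfold pvW pvBInner
  obtain ⟨f, hf⟩ : ∃ f, (wl.drop i).length + 1 = f + 1 := ⟨(wl.drop i).length, rfl⟩
  rw [hf]
  simp only [pvAGo, if_neg hsne]
  refine (PySem.List.foldl_congr_mem _ _ _ _ ?_).symm
  intro acc w hw
  have hwne : w ≠ [] := fun h => h0 (h ▸ hw)
  by_cases hp : w.isPrefixOf (wl.drop i)
  · rw [if_pos hp, if_pos ⟨hwne, hp⟩]
    have hwlen : 1 ≤ w.length := by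
      cases w with
      | nil => exact absurd rfl hwne
      | cons c t => simp
    have hle : w.length ≤ (wl.drop i).length :=
      (List.IsPrefix.length_le (List.isPrefixOf_iff_prefix.mp hp))
    have hdl : (wl.drop i).length = wl.length - i := by simp
    -- the table lookup hits position i + w.length
    have hidx : w.length - 1 < wl.length + 1 - (i + 1) := by omega
    have htab : (pvTab wl ows (i + 1)).getD (w.length - 1) 0
        = pvW ows (wl.drop (i + 1 + (w.length - 1))) := by
      unfold pvTab
      rw [List.getD_eq_getElem?_getD]
      rw [List.getElem?_map, List.getElem?_range']
      · simp only [Option.map_some, Option.getD_some, one_mul]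
      · exact hidx
    have hpos : i + 1 + (w.length - 1) = i + w.length := by omega
    rw [htab, hpos]
    -- and A's recursive call computes the same table value
    have hdrop : (wl.drop i).drop w.length = wl.drop (i + w.length) := by
      rw [List.drop_drop]
    congr 1
    rw [hdrop]
    refine pvAGo_fuel ows h0 ((wl.drop (i + w.length)).length) _ _ _ le_rfl ?_ ?_
    · simp; omega
    · omega
  · rw [if_neg hp, if_neg (by tauto)]

lemma pvBLoop_inv (wl : List Char) (ows : List (List Char)) (h0 : [] ∉ ows) :
    ∀ i, i ≤ wl.length → pvBLoop wl ows i (pvTab wl ows i) = pvTab wl ows 0 := by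
  intro i
  induction i with
  | zero => intro _; rfl
  | succ i ih =>
    intro hi
    have hstep : pvBInner wl ows i (pvTab wl ows (i + 1)) :: pvTab wl ows (i + 1)
        = pvTab wl ows i := by
      rw [pvBInner_tab wl ows h0 i (by omega), ← pvTab_cons wl ows i (by omega)]
    calc pvBLoop wl ows (i + 1) (pvTab wl ows (i + 1))
        = pvBLoop wl ows i (pvBInner wl ows i (pvTab wl ows (i + 1)) :: pvTab wl ows (i + 1)) := rfl
      _ = pvBLoop wl ows i (pvTab wl ows i) := by rw [hstep]
      _ = pvTab wl ows 0 := ih (by omega)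

lemma mem_map_toList_nil (ows : List String) (h : "" ∉ ows) : [] ∉ ows.map String.toList := by
  intro hmem
  obtain ⟨s, hs, hnil⟩ := List.mem_map.mp hmem
  apply h
  have hnil' : s.toList = "".toList := by simpa using hnil
  exact (String.toList_inj.mp hnil') ▸ hs

-- ===== VERDICT (by name: the statement is the Claim_ definition above) =====
theorem count_can_form_spec : Claim_equal_count_can_form := by
  intro word other_words _ hpre
  unfold Spec_count_can_form count_can_form count_can_form_alt
  set wl := word.toList with hwl
  set ows := other_words.map String.toList with hows
  by_cases hw : word = ""
  · subst hw
    simp [pvAGo, pvBLoop, hwl]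
  · have h0 : [] ∉ ows :=
      mem_map_toList_nil other_words (hpre.resolve_left hw)
    have htabn : pvTab wl ows wl.length = [1] := by
      unfold pvTab
      simp [pvW, pvAGo]
    have := pvBLoop_inv wl ows h0 wl.length le_rfl
    rw [htabn] at this
    rw [this, pvTab_cons wl ows 0 (by omega)]
    simp [pvW]
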